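-- pv_equiv track=rewrite | github.com/ningg/Agentic-Design-Patterns-EN | scripts/gen_cn_index_of_terms.py | split_index_line
-- ===== SOURCE A (Python) =====
-- from typing import Optional, Tuple
--
-- def split_index_line(line: str) -> Optional[Tuple[str, str]]:
--     line = line.strip()
--     if not line.startswith("- "):
--         return None
--     rest = line[2:]
--     markers = [" - Chapter ", " - Appendix ", " - Glossary", " - What makes", " - Introduction"]
--     best_pos = None
--     for m in markers:
--         pos = rest.find(m)
--         if pos != -1 and (best_pos is None or pos < best_pos):
--             best_pos = pos
--     if best_pos is None:
--         return None
--     term = rest[:best_pos].strip()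
--     loc = rest[best_pos + 3 :].strip()
--     return term, loc
-- ===== SOURCE B (Python) =====
-- def split_index_line(line):
--     line = line.strip()
--     if not line.startswith("- "):
--         return None
--     rest = line[2:]
--     tails = ("Chapter ", "Appendix ", "Glossary", "What makes", "Introduction")
--     for i in range(len(rest)):
--         if rest.startswith(" - ", i) and any(rest.startswith(t, i + 3) for t in tails):
--             return rest[:i].strip(), rest[i + 3:].strip()
--     return None
-- ===== Notes on version B (the rewrite author's own statement) =====
-- stated objective: alternative
-- what changed: A runs five separate str.find scans (one per marker) and keeps a running minimum position; B makes a single left-to-right scan over the positions of rest and stops at the first index where the dash separator followed by any marker tail starts.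
import Mathlib
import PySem

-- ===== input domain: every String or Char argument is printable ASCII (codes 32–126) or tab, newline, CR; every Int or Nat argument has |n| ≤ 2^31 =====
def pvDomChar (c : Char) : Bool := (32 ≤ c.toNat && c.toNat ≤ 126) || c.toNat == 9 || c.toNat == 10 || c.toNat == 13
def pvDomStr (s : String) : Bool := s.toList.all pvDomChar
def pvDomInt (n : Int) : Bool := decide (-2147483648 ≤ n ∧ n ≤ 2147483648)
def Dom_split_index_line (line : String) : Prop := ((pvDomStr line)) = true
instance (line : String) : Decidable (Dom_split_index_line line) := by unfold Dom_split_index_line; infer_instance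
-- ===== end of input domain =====

-- B replaces A's five separate find() scans (one per marker, then a running minimum) by a
-- single left-to-right scan that stops at the first index where any marker starts
-- (objective: alternative, same asymptotic cost).

-- ===== PORT A =====
def pvMarkersA : List String :=
  [" - Chapter ", " - Appendix ", " - Glossary", " - What makes", " - Introduction"]

-- A's marker loop (running best_pos) and term/loc split, on rest = line[2:]
def pvSplitRest (rest : String) : Option (String × String) :=
  match pvMarkersA.foldl (fun best_pos m =>
      let pos := PySem.Str.find rest m
      if pos != -1 && (match best_pos with | none => true | some b => decide (pos < b)) then
        some pos
      else best_pos) (none : Option Int) with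
  | none => none
  | some p =>
      some (PySem.Str.strip (PySem.Str.slice rest none (some p)),
            PySem.Str.strip (PySem.Str.slice rest (some (p + 3)) none))

def split_index_line (line : String) : Option (String × String) :=
  if !(PySem.Str.startswith (PySem.Str.strip line) "- ") then none
  else pvSplitRest (PySem.Str.slice (PySem.Str.strip line) (some 2) none)

-- ===== PORT B =====
def pvTailsB : List (List Char) :=
  ["Chapter ".toList, "Appendix ".toList, "Glossary".toList, "What makes".toList,
   "Introduction".toList]

-- rest.startswith(" - ", i) and any(rest.startswith(t, i + 3) for t in tails), on the suffix at i
def pvMarkAt (s : List Char) : Bool :=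
  " - ".toList.isPrefixOf s && pvTailsB.any (fun t => t.isPrefixOf (s.drop 3))

-- B's `for i in range(len(rest))` loop: first index whose suffix starts with a marker
def pvScan : List Char → Nat → Option Nat
  | [], _ => none
  | c :: cs, i => if pvMarkAt (c :: cs) then some i else pvScan cs (i + 1)

def pvSplitRestAlt (r : List Char) : Option (String × String) :=
  match pvScan r 0 with
  | some i =>
      some (String.ofList (PySem.Chars.strip (r.take i)),
            String.ofList (PySem.Chars.strip (r.drop (i + 3))))
  | none => none

def split_index_line_alt (line : String) : Option (String × String) :=
  if PySem.Str.startswith (PySem.Str.strip line) "- " then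
    pvSplitRestAlt (PySem.Str.slice (PySem.Str.strip line) (some 2) none).toList
  else none

-- ===== PRECONDITION & SPEC =====
def Spec_split_index_line (line : String) (out : Option (String × String)) : Prop := out = split_index_line_alt line
instance (line : String) (out : Option (String × String)) : Decidable (Spec_split_index_line line out) := by unfold Spec_split_index_line; infer_instance

-- ===== CLAIM (what is proved, stated in full; the proofs are below) =====
def Claim_equal_split_index_line : Prop := ∀ (line : String), Dom_split_index_line line → Spec_split_index_line line (split_index_line line)

-- ===== LEMMAS AND PROOFS =====

-- A's `pos = rest.find(m)` packaged as an Option (none = not found)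
def pvF (r : List Char) (m : String) : Option Int :=
  if PySem.Chars.find r m.toList = -1 then none else some (PySem.Chars.find r m.toList)

def pvMin : Option Int → Option Int → Option Int
  | none, o => o
  | some a, none => some a
  | some a, some c => some (min c a)

-- "some marker of A starts at the head of s"
def pvMarkAny (s : List Char) : Bool := pvMarkersA.any (fun m => m.toList.isPrefixOf s)

theorem pv_prefix_append (a b s : List Char) :
    (a ++ b) <+: s ↔ a <+: s ∧ b <+: s.drop a.length := by
  constructor
  · rintro ⟨t, rfl⟩
    refine ⟨⟨b ++ t, by simp⟩, ?_⟩
    simp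
  · rintro ⟨⟨t, rfl⟩, hb⟩
    simp at hb
    obtain ⟨u, hu⟩ := hb
    exact ⟨u, by simp [← hu]⟩

theorem pv_isPrefixOf_append (a b s : List Char) :
    (a ++ b).isPrefixOf s = (a.isPrefixOf s && b.isPrefixOf (s.drop a.length)) := by
  rcases h : (a.isPrefixOf s && b.isPrefixOf (s.drop a.length)) with _ | _
  · simp only [Bool.and_eq_false_iff] at h
    apply Bool.eq_false_iff.mpr
    intro hc
    rw [List.isPrefixOf_iff_prefix, pv_prefix_append] at hc
    rcases h with h | h <;> rw [Bool.eq_false_iff] at h <;>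
      exact h (List.isPrefixOf_iff_prefix.mpr (by tauto))
  · simp only [Bool.and_eq_true, List.isPrefixOf_iff_prefix] at h ⊢
    exact pv_prefix_append a b s |>.mpr h

theorem pvMarkAt_eq (s : List Char) : pvMarkAt s = pvMarkAny s := by
  have h1 : (" - Chapter ").toList = (" - ").toList ++ ("Chapter ").toList := by decide
  have h2 : (" - Appendix ").toList = (" - ").toList ++ ("Appendix ").toList := by decide
  have h3 : (" - Glossary").toList = (" - ").toList ++ ("Glossary").toList := by decide
  have h4 : (" - What makes").toList = (" - ").toList ++ ("What makes").toList := by decide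
  have h5 : (" - Introduction").toList = (" - ").toList ++ ("Introduction").toList := by decide
  have hl : (" - ").toList.length = 3 := by decide
  simp only [pvMarkAt, pvMarkAny, pvMarkersA, pvTailsB, List.any_cons, List.any_nil,
    h1, h2, h3, h4, h5, pv_isPrefixOf_append, hl, Bool.or_false]
  cases (" - ").toList.isPrefixOf s <;> simp

theorem pvScan_shift (s : List Char) (i : Nat) :
    pvScan s i = (pvScan s 0).map (· + i) := by
  induction s generalizing i with
  | nil => simp [pvScan]
  | cons c cs ih =>
    by_cases h : pvMarkAt (c :: cs) = true
    · simp [pvScan, h]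
    · simp only [pvScan, if_neg h, ih (i+1), ih 1, Option.map_map]
      cases pvScan cs 0 <;> simp
      omega

theorem pvScan_zero_none (s : List Char) :
    pvScan s 0 = none ↔ ∀ j, pvMarkAt (s.drop j) = false := by
  have h0 : pvMarkAt [] = false := by decide
  induction s with
  | nil => simp [pvScan, h0]
  | cons c cs ih =>
    by_cases h : pvMarkAt (c :: cs) = true
    · simp only [pvScan, if_pos h]
      constructor
      · intro hc; exact absurd hc (by simp)
      · intro hj; have := hj 0; simp [h] at this
    · simp only [pvScan, if_neg h, pvScan_shift cs 1, Option.map_eq_none_iff, ih]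
      constructor
      · intro hj j
        cases j with
        | zero => simpa using Bool.eq_false_iff.mpr h
        | succ j => exact hj j
      · intro hj j; exact hj (j+1)

theorem pvScan_zero_some (s : List Char) (k : Nat) (h : pvScan s 0 = some k) :
    pvMarkAt (s.drop k) = true ∧ ∀ j < k, pvMarkAt (s.drop j) = false := by
  induction s generalizing k with
  | nil => simp [pvScan] at h
  | cons c cs ih =>
    by_cases hm : pvMarkAt (c :: cs) = true
    · simp only [pvScan, if_pos hm] at h
      obtain rfl : k = 0 := by simpa using h.symm
      exact ⟨hm, by omega⟩
    · simp only [pvScan, if_neg hm, pvScan_shift cs 1, Option.map_eq_some_iff] at h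
      obtain ⟨k', hk', rfl⟩ := h
      obtain ⟨hh1, hh2⟩ := ih k' hk'
      refine ⟨by simpa using hh1, ?_⟩
      intro j hj
      cases j with
      | zero => simpa using Bool.eq_false_iff.mpr hm
      | succ j => exact hh2 j (by omega)
theorem pvFold_none_iff (ms : List String) (r : List Char) (b : Option Int) :
    ms.foldl (fun b m => pvMin b (pvF r m)) b = none ↔
      b = none ∧ ∀ m ∈ ms, pvF r m = none := by
  induction ms generalizing b with
  | nil => simp
  | cons m ms ih =>
    simp only [List.foldl_cons, ih, List.mem_cons]
    constructor
    · rintro ⟨hmin, hall⟩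
      have hb : b = none ∧ pvF r m = none := by
        cases b <;> cases hf : pvF r m <;> rw [hf] at hmin <;> simp only [pvMin] at hmin <;>
          simp_all
      refine ⟨hb.1, ?_⟩
      rintro x (rfl | hx)
      · exact hb.2
      · exact hall x hx
    · rintro ⟨rfl, hall⟩
      have hf : pvF r m = none := hall m (Or.inl rfl)
      rw [hf]
      exact ⟨rfl, fun x hx => hall x (Or.inr hx)⟩

theorem pvFold_some (ms : List String) (r : List Char) (b : Option Int) (w : Int)
    (h : ms.foldl (fun b m => pvMin b (pvF r m)) b = some w) :
    (b = some w ∨ ∃ m ∈ ms, pvF r m = some w) ∧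
      (∀ u, b = some u → w ≤ u) ∧ (∀ m ∈ ms, ∀ u, pvF r m = some u → w ≤ u) := by
  induction ms generalizing b with
  | nil => simp_all
  | cons m ms ih =>
    simp only [List.foldl_cons] at h
    obtain ⟨hsrc, hle, hrest⟩ := ih (pvMin b (pvF r m)) h
    have hrest' : ∀ x ∈ m :: ms, ∀ u, pvF r x = some u → w ≤ u := by
      intro x hx u hu
      rcases List.mem_cons.mp hx with rfl | hx'
      · -- x = m
        cases b with
        | none =>
          rw [hu] at hsrc hle; simp only [pvMin] at hsrc hle
          exact hle u rfl
        | some a =>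
          rw [hu] at hle; simp only [pvMin] at hle
          have := hle (min u a) rfl
          omega
      · exact hrest x hx' u hu
    refine ⟨?_, ?_, hrest'⟩
    · cases hf : pvF r m with
      | none =>
        rw [hf] at hsrc; cases b <;> simp only [pvMin] at hsrc
        · rcases hsrc with h' | ⟨x, hx, hx2⟩
          · exact absurd h' (by simp)
          · exact Or.inr ⟨x, List.mem_cons_of_mem _ hx, hx2⟩
        · rcases hsrc with h' | ⟨x, hx, hx2⟩
          · exact Or.inl h'
          · exact Or.inr ⟨x, List.mem_cons_of_mem _ hx, hx2⟩
      | some p =>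
        rw [hf] at hsrc; cases b with
        | none =>
          simp only [pvMin] at hsrc
          rcases hsrc with h' | ⟨x, hx, hx2⟩
          · exact Or.inr ⟨m, List.mem_cons_self .., by rw [hf, h']⟩
          · exact Or.inr ⟨x, List.mem_cons_of_mem _ hx, hx2⟩
        | some a =>
          simp only [pvMin] at hsrc
          rcases hsrc with h' | ⟨x, hx, hx2⟩
          · have hmin : min p a = w := Option.some_inj.mp h'
            by_cases hpa : p ≤ a
            · exact Or.inr ⟨m, List.mem_cons_self .., by rw [hf]; congr 1; omega⟩
            · refine Or.inl ?_; congr 1; simp [min_def] at hmin; omega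
          · exact Or.inr ⟨x, List.mem_cons_of_mem _ hx, hx2⟩
    · intro u hu
      subst hu
      cases hf : pvF r m with
      | none => rw [hf] at hle; cases hsrc <;> [skip; skip] <;> exact hle u rfl
      | some p =>
        rw [hf] at hle; simp only [pvMin] at hle
        have := hle (min p u) rfl
        omega

theorem pvF_none_iff (r : List Char) (m : String) :
    pvF r m = none ↔ ∀ j, ¬ m.toList <+: r.drop j := by
  unfold pvF
  by_cases h : PySem.Chars.find r m.toList = -1
  · rw [if_pos h]
    have hni : ¬ m.toList <:+: r := (PySem.Chars.find_eq_neg_one_iff r m.toList).mp h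
    simp only [true_iff]
    intro j hj
    exact hni ((PySem.Chars.isIn_iff_infix m.toList r).mp
      ((PySem.Chars.exists_prefix_drop_iff_isIn m.toList r).mp ⟨j, hj⟩))
  · rw [if_neg h]
    simp only [reduceCtorEq, false_iff, not_forall, not_not]
    exact (PySem.Chars.exists_prefix_drop_iff_isIn m.toList r).mpr
      ((PySem.Chars.isIn_iff_infix m.toList r).mpr
        ((PySem.Chars.find_ne_neg_one_iff r m.toList).mp h))

theorem pvF_some (r : List Char) (m : String) (u : Int) (h : pvF r m = some u) :
    0 ≤ u ∧ m.toList <+: r.drop u.toNat ∧ ∀ i < u.toNat, ¬ m.toList <+: r.drop i := by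
  unfold pvF at h
  by_cases hne : PySem.Chars.find r m.toList = -1
  · simp [hne] at h
  · rw [if_neg hne] at h
    obtain rfl : PySem.Chars.find r m.toList = u := Option.some_inj.mp h
    have hge : 0 ≤ PySem.Chars.find r m.toList := by
      have := PySem.Chars.neg_one_le_find r m.toList
      omega
    obtain ⟨h1, h2⟩ := PySem.Chars.find_spec hge
    exact ⟨hge, h1, h2⟩

theorem pvMarkAny_iff (s : List Char) :
    pvMarkAny s = true ↔ ∃ m ∈ pvMarkersA, m.toList <+: s := by
  simp [pvMarkAny, List.any_eq_true, List.isPrefixOf_iff_prefix]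

theorem pvBest_eq (r : List Char) :
    pvMarkersA.foldl (fun b m => pvMin b (pvF r m)) none
      = (pvScan r 0).map (fun k => (k : Int)) := by
  cases hs : pvScan r 0 with
  | none =>
    have hres : pvMarkersA.foldl (fun b m => pvMin b (pvF r m)) none = none := by
      rw [pvFold_none_iff]
      refine ⟨rfl, ?_⟩
      intro m hm
      rw [pvF_none_iff]
      intro j hj
      have h1 := (pvScan_zero_none r).mp hs j
      rw [pvMarkAt_eq] at h1
      have h2 : pvMarkAny (r.drop j) = true := (pvMarkAny_iff _).mpr ⟨m, hm, hj⟩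
      simp_all
    rw [hres]
    rfl
  | some k =>
    obtain ⟨hk1, hk2⟩ := pvScan_zero_some r k hs
    rw [pvMarkAt_eq] at hk1
    obtain ⟨m0, hm0, hp0⟩ := (pvMarkAny_iff _).mp hk1
    cases hfold : pvMarkersA.foldl (fun b m => pvMin b (pvF r m)) none with
    | none =>
      obtain ⟨-, hall⟩ := (pvFold_none_iff _ r none).mp hfold
      exact absurd hp0 ((pvF_none_iff r m0).mp (hall m0 hm0) k)
    | some w =>
      obtain ⟨hsrc, -, hmin⟩ := pvFold_some _ r none w hfold
      rcases hsrc with h' | ⟨m1, hm1, hw⟩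
      · exact absurd h' (by simp)
      · obtain ⟨hw0, hwpre, -⟩ := pvF_some r m1 w hw
        have hge : k ≤ w.toNat := by
          by_contra hlt
          push Not at hlt
          have h3 := hk2 w.toNat hlt
          rw [pvMarkAt_eq] at h3
          have h4 : pvMarkAny (r.drop w.toNat) = true :=
            (pvMarkAny_iff _).mpr ⟨m1, hm1, hwpre⟩
          simp_all
        have hf0 : pvF r m0 ≠ none := by
          rw [Ne, pvF_none_iff]; push Not; exact ⟨k, hp0⟩
        cases hu : pvF r m0 with
        | none => exact absurd hu hf0
        | some u0 =>
          obtain ⟨hu0nn, hu0pre, hu0min⟩ := pvF_some r m0 u0 hu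
          have hu0k : u0.toNat ≤ k := by
            by_contra hlt; push Not at hlt
            exact hu0min k hlt hp0
          have hwu : w ≤ u0 := hmin m0 hm0 u0 hu
          show _ = some ((k : Int))
          congr 1
          omega

theorem pvStep_eq (rest : String) :
    (fun (best_pos : Option Int) (m : String) =>
      let pos := PySem.Str.find rest m
      if pos != -1 && (match best_pos with | none => true | some b => decide (pos < b)) then
        some pos
      else best_pos)
    = fun b m => pvMin b (pvF rest.toList m) := by
  funext b m
  simp only [PySem.Str.find_eq]
  by_cases hf : PySem.Chars.find rest.toList m.toList = -1
  · cases b <;> simp [pvF, pvMin, hf]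
  · have hb : (PySem.Chars.find rest.toList m.toList != -1) = true := by simp [hf]
    cases b with
    | none => simp [pvF, pvMin, hf, hb]
    | some a =>
      simp only [pvF, if_neg hf, pvMin, hb, Bool.true_and]
      by_cases hlt : PySem.Chars.find rest.toList m.toList < a
      · simp [hlt, min_def]
        omega
      · simp [hlt, min_def]
        omega

theorem pvSlice_take (s : String) (k : Nat) :
    (PySem.Str.slice s none (some (k:Int))).toList = s.toList.take k := by
  rw [PySem.Str.toList_slice]
  simp only [PySem.Chars.slice_eq_listSlice]
  rw [PySem.List.slice_to s.toList (by omega : (0:Int) ≤ (k:Int))]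
  simp

theorem pvSlice_drop (s : String) (k : Nat) :
    (PySem.Str.slice s (some ((k:Int)+3)) none).toList = s.toList.drop (k+3) := by
  rw [PySem.Str.toList_slice]
  simp only [PySem.Chars.slice_eq_listSlice]
  rw [PySem.List.slice_from s.toList (by omega : (0:Int) ≤ (k:Int)+3)]
  have h3 : ((k:Int)+3).toNat = k+3 := by omega
  rw [h3]

theorem pvSplitRest_eq (rest : String) : pvSplitRest rest = pvSplitRestAlt rest.toList := by
  unfold pvSplitRest pvSplitRestAlt
  rw [pvStep_eq, pvBest_eq]
  cases hs : pvScan rest.toList 0 with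
  | none => rfl
  | some k =>
    refine congrArg some (Prod.ext ?_ ?_) <;> apply String.toList_inj.mp <;>
      beta_reduce <;> simp only [PySem.Str.toList_strip, String.toList_ofList]
    · rw [pvSlice_take]
    · rw [pvSlice_drop]

-- ===== VERDICT (by name: the statement is the Claim_ definition above) =====
theorem split_index_line_spec : Claim_equal_split_index_line := by
  intro line _
  unfold Spec_split_index_line split_index_line split_index_line_alt
  by_cases hsw : PySem.Str.startswith (PySem.Str.strip line) "- " = true
  · rw [if_neg (by rw [hsw]; decide), if_pos hsw]
    exact pvSplitRest_eq _
  · simp only [Bool.not_eq_true] at hsw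
    rw [if_pos (by rw [hsw]; decide), if_neg (by rw [hsw]; decide)]
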